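-- pv_equiv track=rewrite | github.com/EmilioUgarte65/Dexter | skills/security/security-auditor/scripts/audit.py | get_body_lines
-- ===== SOURCE A (Python) =====
-- from typing import List, Tuple, Optional
--
-- def get_body_lines(text: str) -> List[Tuple[int, str]]:
--     lines = text.splitlines()
--     if not lines or lines[0].strip() != "---":
--         return list(enumerate(lines, 1))
--     for i, line in enumerate(lines[1:], 1):
--         if line.strip() == "---":
--             return [(j + 1, lines[j]) for j in range(i + 1, len(lines))]
--     return []
-- ===== SOURCE B (Python) =====
-- def get_body_lines(text):
--     lines = text.splitlines()
--     if not lines or lines[0].strip() != "---":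
--         return list(enumerate(lines, 1))
--     in_body = False
--     acc = []
--     n = 1
--     for line in lines[1:]:
--         n += 1
--         if in_body:
--             acc.append((n, line))
--         elif line.strip() == "---":
--             in_body = True
--     return acc if in_body else []
-- ===== Notes on version B (the rewrite author's own statement) =====
-- stated objective: alternative
-- what changed: Replaces find-closing-delimiter-then-index-back-into-the-full-list-with-a-range-comprehension by one forward pass over lines[1:] with an explicit line counter, an in_body flag and a result accumulator.
import Mathlib
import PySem

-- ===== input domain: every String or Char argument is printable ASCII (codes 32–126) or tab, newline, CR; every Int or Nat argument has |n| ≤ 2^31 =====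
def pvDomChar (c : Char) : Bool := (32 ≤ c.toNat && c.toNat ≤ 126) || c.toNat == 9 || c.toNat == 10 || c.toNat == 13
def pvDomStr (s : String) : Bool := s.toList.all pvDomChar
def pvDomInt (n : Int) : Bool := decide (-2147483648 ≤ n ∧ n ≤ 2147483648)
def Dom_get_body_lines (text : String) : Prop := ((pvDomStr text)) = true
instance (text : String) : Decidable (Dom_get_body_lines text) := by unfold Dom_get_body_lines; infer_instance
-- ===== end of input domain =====

-- B replaces A's find-closing-index-then-range-comprehension by a single forward pass
-- with a line counter, an in_body flag and an accumulator (alternative decomposition, same cost).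

-- ===== PORT A =====
-- A's 'for i, line in enumerate(lines[1:], 1): if line.strip() == "---": return i'
def pvAFind : List String → Int → Option Int
  | [], _ => none
  | l :: rest, i => if PySem.Str.strip l = "---" then some i else pvAFind rest (i + 1)

def get_body_lines (text : String) : List (Int × String) :=
  let lines := PySem.Str.splitlines text
  if lines = [] ∨ PySem.Str.strip lines.headI ≠ "---" then
    PySem.List.enumerate lines 1
  else
    match pvAFind (lines.drop 1) 1 with
    | some i =>
        (PySem.List.pyRange (i + 1) (lines.length : Int) 1).map
          (fun j => (j + 1, PySem.List.pyGetD lines j ""))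
    | none => []

-- ===== PORT B =====
-- B's loop: counter n, flag in_body, accumulator acc
def pvBLoop : List String → Int → Bool → List (Int × String) → Bool × List (Int × String)
  | [], _, inb, acc => (inb, acc)
  | l :: rest, n, inb, acc =>
    if inb then pvBLoop rest (n + 1) inb (acc ++ [(n + 1, l)])
    else if PySem.Str.strip l = "---" then pvBLoop rest (n + 1) true acc
    else pvBLoop rest (n + 1) false acc

def get_body_lines_alt (text : String) : List (Int × String) :=
  let lines := PySem.Str.splitlines text
  if lines = [] ∨ PySem.Str.strip lines.headI ≠ "---" then
    PySem.List.enumerate lines 1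
  else
    let p := pvBLoop (lines.drop 1) 1 false []
    if p.1 then p.2 else []

-- ===== PRECONDITION & SPEC =====
def Spec_get_body_lines (text : String) (out : List (Int × String)) : Prop := out = get_body_lines_alt text
instance (text : String) (out : List (Int × String)) : Decidable (Spec_get_body_lines text out) := by unfold Spec_get_body_lines; infer_instance

-- ===== CLAIM (what is proved, stated in full; the proofs are below) =====
def Claim_equal_get_body_lines : Prop := ∀ (text : String), Dom_get_body_lines text → Spec_get_body_lines text (get_body_lines text)

-- ===== LEMMAS AND PROOFS =====

lemma pvAFind_ge : ∀ (ts : List String) (j i : Int), pvAFind ts j = some i → j ≤ i := by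
  intro ts
  induction ts with
  | nil => intro j i h; simp [pvAFind] at h
  | cons l rest ih =>
    intro j i h
    simp only [pvAFind] at h
    split at h
    · cases h; omega
    · have := ih (j + 1) i h; omega

lemma pvBLoop_true : ∀ (ts : List String) (n : Int) (acc : List (Int × String)),
    pvBLoop ts n true acc = (true, acc ++ PySem.List.enumerate ts (n + 1)) := by
  intro ts
  induction ts with
  | nil => intro n acc; simp [pvBLoop, PySem.List.enumerate_nil]
  | cons l rest ih =>
    intro n acc
    simp [pvBLoop, ih, PySem.List.enumerate_cons]

lemma pvBLoop_main : ∀ (ts : List String) (i0 : Int),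
    (if (pvBLoop ts i0 false []).1 then (pvBLoop ts i0 false []).2 else []) =
      (match pvAFind ts i0 with
       | none => ([] : List (Int × String))
       | some i => PySem.List.enumerate (ts.drop (i + 1 - i0).toNat) (i + 2)) := by
  intro ts
  induction ts with
  | nil => intro i0; simp [pvBLoop, pvAFind]
  | cons l rest ih =>
    intro i0
    by_cases h : PySem.Str.strip l = "---"
    · have hA : pvAFind (l :: rest) i0 = some i0 := by simp [pvAFind, h]
      have hB : pvBLoop (l :: rest) i0 false [] =
          (true, PySem.List.enumerate rest (i0 + 1 + 1)) := by
        simp [pvBLoop, h, pvBLoop_true]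
      have h1 : (i0 + 1 - i0).toNat = 1 := by omega
      simp only [hA, hB, if_pos, h1, List.drop_succ_cons, List.drop_zero]
      show PySem.List.enumerate rest (i0 + 1 + 1) = PySem.List.enumerate rest (i0 + 2)
      congr 1
      ring
    · have hA : pvAFind (l :: rest) i0 = pvAFind rest (i0 + 1) := by simp [pvAFind, h]
      have hB : pvBLoop (l :: rest) i0 false [] = pvBLoop rest (i0 + 1) false [] := by
        simp [pvBLoop, h]
      rw [hA, hB, ih (i0 + 1)]
      cases hf : pvAFind rest (i0 + 1) with
      | none => rfl
      | some i =>
        have hi := pvAFind_ge rest (i0 + 1) i hf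
        have h2 : (i + 1 - i0).toNat = (i + 1 - (i0 + 1)).toNat + 1 := by omega
        simp only [h2, List.drop_succ_cons]

lemma pv_bridge (lines : List String) : ∀ (a : Nat),
    (PySem.List.pyRange (a : Int) (lines.length : Int) 1).map
        (fun j => (j + 1, PySem.List.pyGetD lines j "")) =
      PySem.List.enumerate (lines.drop a) ((a : Int) + 1) := by
  intro a
  induction hd : lines.drop a generalizing a with
  | nil =>
    have ha : lines.length ≤ a := by
      have := List.drop_eq_nil_iff.mp hd
      omega
    rw [PySem.List.pyRange_one_eq_nil (by exact_mod_cast ha)]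
    simp [PySem.List.enumerate_nil]
  | cons x tl ih =>
    have ha : a < lines.length := by
      by_contra hge
      push Not at hge
      rw [List.drop_eq_nil_iff.mpr hge] at hd
      cases hd
    have hx : lines[a]? = some x := by
      have h0 := congrArg (fun l => l[0]?) hd
      simpa [List.getElem?_drop] using h0
    have hget : PySem.List.pyGetD lines (a : Int) "" = x := by
      rw [PySem.List.pyGetD_natCast, List.getD_eq_getElem?_getD, hx]
      rfl
    have hdrop : lines.drop (a + 1) = tl := by
      rw [← List.tail_drop, hd]
      rfl
    rw [PySem.List.pyRange_one_cons (by exact_mod_cast ha), List.map_cons,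
      PySem.List.enumerate_cons]
    have hih := ih (a + 1) hdrop
    push_cast at hih
    congr 1
    rw [hget]

lemma pv_bridge_int (lines : List String) (i : Int) (hi : 0 ≤ i) :
    (PySem.List.pyRange (i + 1) (lines.length : Int) 1).map
        (fun j => (j + 1, PySem.List.pyGetD lines j "")) =
      PySem.List.enumerate (lines.drop (i + 1).toNat) (i + 2) := by
  obtain ⟨n, rfl⟩ := Int.eq_ofNat_of_zero_le hi
  have h := pv_bridge lines (n + 1)
  push_cast at h ⊢
  have h1 : ((n : Int) + 1).toNat = n + 1 := by omega
  rw [h1]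
  rw [show ((n : Int) + 2) = ((n : Int) + 1) + 1 by ring]
  exact h

-- ===== VERDICT (by name: the statement is the Claim_ definition above) =====
theorem get_body_lines_spec : Claim_equal_get_body_lines := by
  intro text _
  unfold Spec_get_body_lines get_body_lines get_body_lines_alt
  set lines := PySem.Str.splitlines text with hl
  by_cases hg : lines = [] ∨ PySem.Str.strip lines.headI ≠ "---"
  · simp [hg]
  · simp only [if_neg hg]
    rw [pvBLoop_main (lines.drop 1) 1]
    cases hf : pvAFind (lines.drop 1) 1 with
    | none => rfl
    | some i =>
      have hi : 1 ≤ i := pvAFind_ge _ _ _ hf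
      have h2 : (lines.drop 1).drop (i + 1 - 1).toNat = lines.drop (i + 1).toNat := by
        rw [List.drop_drop]
        congr 1
        omega
      show (PySem.List.pyRange (i + 1) (lines.length : Int) 1).map
          (fun j => (j + 1, PySem.List.pyGetD lines j "")) =
        PySem.List.enumerate ((lines.drop 1).drop (i + 1 - 1).toNat) (i + 2)
      rw [h2]
      exact pv_bridge_int lines i (by omega)
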